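-- pv_equiv track=rewrite | github.com/chr233/backup_by_mail | core.py | gen_pack_info
-- ===== SOURCE A (Python) =====
-- def size2str(size: float) -> str:
--     '''将字节转换成合适的单位
--     输入：
--         字节数
--     返回：
--         形如 1.0KB 的格式
--     '''
--     def sos(integer, remainder, level):
--         if integer >= 1024:
--             remainder = integer % 1024
--             integer //= 1024
--             level += 1
--             return sos(integer, remainder, level)
--         else:
--             return integer, remainder, level
--
--     units = ['B', 'KB', 'MB', 'GB', 'TB', 'PB', 'EB']
--     integer, remainder, level = sos(size, 0, 0)
--     if level+1 > len(units):
--         level = -1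
--     return (f'{integer}.{str(remainder)[:2]}{units[level]}')
--
-- def gen_pack_info(file_group: list) -> str:
--     '''(文件名,索引,文件块数,起始字节,读取字节)'''
--     info_list = []
--     total = 0
--     i = 0
--     for i, (name, *_, size) in enumerate(file_group, 1):
--         total += size
--         info_list.append(
--             f'{f"{i}".rjust(2)}.[{f"{size2str(size)}".rjust(8)}] {name}\n'
--         )
--
--     msg = (f'{"附件清单".center(50,"=")}\n'
--            f'{"".join(info_list)}'
--            f'{f"总计[{i}]个文件，占用【{size2str(total)}】空间".center(50,"=")}\n'
--            )
--     return(msg)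
-- ===== SOURCE B (Python) =====
-- def size2str(size: float) -> str:
--     '''将字节转换成合适的单位 (closed form: unit level from bit_length instead of repeated division)'''
--     units = ['B', 'KB', 'MB', 'GB', 'TB', 'PB', 'EB']
--     if size < 1024:
--         return f'{size}.0B'
--     level = (size.bit_length() - 1) // 10
--     integer = size >> (10 * level)
--     remainder = (size >> (10 * (level - 1))) % 1024
--     unit = units[level] if level < len(units) else units[-1]
--     return f'{integer}.{str(remainder)[:2]}{unit}'
--
-- def gen_pack_info(file_group: list) -> str:
--     '''(文件名,索引,文件块数,起始字节,读取字节)'''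
--     n = len(file_group)
--     total = sum(entry[-1] for entry in file_group)
--     lines = ''.join(
--         f'{str(k + 1).rjust(2)}.[{size2str(entry[-1]).rjust(8)}] {entry[0]}\n'
--         for k, entry in enumerate(file_group)
--     )
--     header = '附件清单'.center(50, '=')
--     footer = f'总计[{n}]个文件，占用【{size2str(total)}】空间'.center(50, '=')
--     return f'{header}\n{lines}{footer}\n'
-- ===== Notes on version B (the rewrite author's own statement) =====
-- stated objective: alternative
-- what changed: size2str's recursive divide-by-1024 loop is replaced by a closed-form computation of the unit level from bit_length with shifts for integer/remainder, and gen_pack_info's single loop with three running accumulators (lines, total, last index) is replaced by independent len/sum/join passes.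
import Mathlib
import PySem

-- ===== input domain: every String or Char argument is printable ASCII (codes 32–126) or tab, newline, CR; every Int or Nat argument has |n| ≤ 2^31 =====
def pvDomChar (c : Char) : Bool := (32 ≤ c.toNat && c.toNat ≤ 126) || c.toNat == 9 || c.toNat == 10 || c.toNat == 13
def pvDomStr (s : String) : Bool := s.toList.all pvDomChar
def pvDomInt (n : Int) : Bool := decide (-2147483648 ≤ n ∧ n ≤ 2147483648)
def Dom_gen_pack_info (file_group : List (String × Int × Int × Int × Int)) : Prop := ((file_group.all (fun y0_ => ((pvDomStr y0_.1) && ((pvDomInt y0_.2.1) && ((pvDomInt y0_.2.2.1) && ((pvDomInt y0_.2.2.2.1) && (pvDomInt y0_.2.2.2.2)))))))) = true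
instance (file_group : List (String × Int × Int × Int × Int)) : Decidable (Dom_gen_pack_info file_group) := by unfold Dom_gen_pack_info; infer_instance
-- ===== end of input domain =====

-- B replaces size2str's repeated-division recursion by a closed-form bit_length computation and
-- gen_pack_info's three running accumulators by len/sum/join over the list (objective: alternative).


-- ===== PORT A =====

-- str.rjust(width, fill): exact CPython behaviour (no-op when width ≤ len)
def pyRJust (cs : List Char) (width : Nat) (fill : Char) : List Char :=
  List.replicate (width - cs.length) fill ++ cs

-- str.center(width, fill): exact CPython formula (left = marg/2 + (marg & width & 1))
def pyCenter (cs : List Char) (width : Nat) (fill : Char) : List Char :=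
  if width ≤ cs.length then cs
  else
    let marg := width - cs.length
    let left := marg / 2 + (marg &&& width &&& 1)
    List.replicate left fill ++ cs ++ List.replicate (marg - left) fill

-- units = ['B', 'KB', 'MB', 'GB', 'TB', 'PB', 'EB'] (shared constant of both Pythons)
def pvUnits : List (List Char) :=
  ["B".toList, "KB".toList, "MB".toList, "GB".toList, "TB".toList, "PB".toList, "EB".toList]

-- A's inner recursive sos (remainder recomputed from the pre-division integer, as in the Python)
def sosA (integer remainder level : Int) : Int × Int × Int :=
  if 1024 ≤ integer then
    sosA (PySem.Int.floordiv integer 1024) (PySem.Int.mod integer 1024) (level + 1)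
  else (integer, remainder, level)
termination_by integer.toNat
decreasing_by
  rw [PySem.Int.floordiv_eq_ediv_of_pos (by omega : (0:Int) < 1024)]
  omega

-- A's size2str; str(remainder)[:2] is 'take 2' (exact: slice [:2] of a non-negative int's digits);
-- units[level] with level ∈ {-1,0,…,6} never raises, so pyGet? …|>.getD [] is exact.
def size2strA (size : Int) : List Char :=
  let r := sosA size 0 0
  let level : Int := if r.2.2 + 1 > 7 then -1 else r.2.2
  PySem.Int.toChars r.1 ++ ['.'] ++ (PySem.Int.toChars r.2.1).take 2
    ++ ((PySem.List.pyGet? pvUnits level).getD [])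

def lineA (i : Int) (e : String × Int × Int × Int × Int) : List Char :=
  pyRJust (PySem.Int.toChars i) 2 ' ' ++ ".[".toList ++ pyRJust (size2strA e.2.2.2.2) 8 ' '
    ++ "] ".toList ++ e.1.toList ++ ['\n']

def gen_pack_info (file_group : List (String × Int × Int × Int × Int)) : String :=
  let st := (PySem.List.enumerate file_group 1).foldl
    (fun (acc : List (List Char) × Int × Int) p =>
      (acc.1 ++ [lineA p.1 p.2], acc.2.1 + p.2.2.2.2.2, p.1))
    ([], 0, 0)
  String.ofList (pyCenter "附件清单".toList 50 '=' ++ ['\n'] ++ st.1.flatten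
    ++ pyCenter ("总计[".toList ++ PySem.Int.toChars st.2.2 ++ "]个文件，占用【".toList
        ++ size2strA st.2.1 ++ "】空间".toList) 50 '=' ++ ['\n'])

-- ===== PORT B =====

-- B's size2str: level from bit_length, integer/remainder by shifts ('>>' of a positive int IS
-- Lean's '>>>'; '%' is PySem.Int.mod; str(remainder)[:2] is 'take 2' as in A's port)
def size2strB (size : Int) : List Char :=
  if size < 1024 then PySem.Int.toChars size ++ ".0B".toList
  else
    let level : Nat := (PySem.Int.bitLength size - 1) / 10
    let integer : Int := size >>> (10 * level)
    let remainder : Int := PySem.Int.mod (size >>> (10 * (level - 1))) 1024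
    let unit : List Char :=
      if level < 7 then (PySem.List.pyGet? pvUnits (level : Int)).getD []
      else (PySem.List.pyGet? pvUnits (-1)).getD []
    PySem.Int.toChars integer ++ ['.'] ++ (PySem.Int.toChars remainder).take 2 ++ unit

def lineB (k : Nat) (e : String × Int × Int × Int × Int) : List Char :=
  pyRJust (PySem.Int.toChars ((k : Int) + 1)) 2 ' ' ++ ".[".toList
    ++ pyRJust (size2strB e.2.2.2.2) 8 ' ' ++ "] ".toList ++ e.1.toList ++ ['\n']

def gen_pack_info_alt (file_group : List (String × Int × Int × Int × Int)) : String :=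
  let n : Int := file_group.length
  let total : Int := (file_group.map (fun e => e.2.2.2.2)).sum
  let lines := (file_group.zipIdx.map (fun p => lineB p.2 p.1)).flatten
  String.ofList (pyCenter "附件清单".toList 50 '=' ++ ['\n'] ++ lines
    ++ pyCenter ("总计[".toList ++ PySem.Int.toChars n ++ "]个文件，占用【".toList
        ++ size2strB total ++ "】空间".toList) 50 '=' ++ ['\n'])

-- ===== PRECONDITION & SPEC =====
def Spec_gen_pack_info (file_group : List (String × Int × Int × Int × Int)) (out : String) : Prop := out = gen_pack_info_alt file_group
instance (file_group : List (String × Int × Int × Int × Int)) (out : String) : Decidable (Spec_gen_pack_info file_group out) := by unfold Spec_gen_pack_info; infer_instance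

-- ===== CLAIM (what is proved, stated in full; the proofs are below) =====
def Claim_equal_gen_pack_info : Prop := ∀ (file_group : List (String × Int × Int × Int × Int)), Dom_gen_pack_info file_group → Spec_gen_pack_info file_group (gen_pack_info file_group)

-- ===== LEMMAS AND PROOFS =====

-- bitLength is characterised by the power-of-two bracket
theorem pv_bl_eq (m k : Nat) (h1 : 2 ^ k ≤ m) (h2 : m < 2 ^ (k + 1)) :
    PySem.Int.bitLength (m : Int) = k + 1 := by
  have hm0 : (m : Int) ≠ 0 := by
    have : 1 ≤ 2 ^ k := Nat.one_le_two_pow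
    omega
  have hlt := PySem.Int.lt_two_pow_bitLength (m : Int)
  have hle := PySem.Int.two_pow_bitLength_le (m : Int) hm0
  rw [Int.natAbs_natCast] at hlt hle
  set b := PySem.Int.bitLength (m : Int) with hb
  by_contra hne
  rcases Nat.lt_or_ge b (k + 1) with h | h
  · have : (2:Nat) ^ b ≤ 2 ^ k := Nat.pow_le_pow_right (by norm_num) (by omega)
    omega
  · have : (2:Nat) ^ (k+1) ≤ 2 ^ (b-1) := Nat.pow_le_pow_right (by norm_num) (by omega)
    omega

theorem pv_bl_bracket (m : Nat) (hm : 1024 ≤ m) :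
    2 ^ (PySem.Int.bitLength (m : Int) - 1) ≤ m ∧ m < 2 ^ (PySem.Int.bitLength (m : Int)) ∧
      11 ≤ PySem.Int.bitLength (m : Int) := by
  have hm0 : (m : Int) ≠ 0 := by omega
  have hlt := PySem.Int.lt_two_pow_bitLength (m : Int)
  have hle := PySem.Int.two_pow_bitLength_le (m : Int) hm0
  rw [Int.natAbs_natCast] at hlt hle
  set b := PySem.Int.bitLength (m : Int) with hb
  refine ⟨hle, hlt, ?_⟩
  by_contra h
  have : (2:Nat) ^ b ≤ 2 ^ 10 := Nat.pow_le_pow_right (by norm_num) (by omega)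
  norm_num at this
  omega

theorem sos_unfold_pos (m : Nat) (hm : 1024 ≤ m) (r lvl : Int) :
    sosA (m : Int) r lvl = sosA ((m / 1024 : Nat) : Int) ((m % 1024 : Nat) : Int) (lvl + 1) := by
  rw [sosA]
  have h1 : (1024:Int) ≤ (m:Int) := by omega
  rw [if_pos h1]
  have e1 : PySem.Int.floordiv (m:Int) 1024 = ((m / 1024 : Nat) : Int) := by
    rw [PySem.Int.floordiv_eq_ediv_of_pos (by omega : (0:Int) < 1024)]; omega
  have e2 : PySem.Int.mod (m:Int) 1024 = ((m % 1024 : Nat) : Int) := by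
    rw [PySem.Int.mod_eq_emod_of_pos (by omega : (0:Int) < 1024)]; omega
  rw [e1, e2]

-- closed form of A's sos on a Nat-valued size ≥ 1024 (B's shift/bit_length formulas)
theorem sos_eq (m : Nat) (hm : 1024 ≤ m) (r lvl : Int) :
    sosA (m : Int) r lvl =
      (((m >>> (10 * ((PySem.Int.bitLength (m : Int) - 1) / 10)) : Nat) : Int),
       ((m >>> (10 * ((PySem.Int.bitLength (m : Int) - 1) / 10 - 1)) % 1024 : Nat) : Int),
       lvl + (((PySem.Int.bitLength (m : Int) - 1) / 10 : Nat) : Int)) := by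
  induction m using Nat.strong_induction_on generalizing r lvl with
  | _ m IH =>
  obtain ⟨hble, hblt, hb11⟩ := pv_bl_bracket m hm
  set b := PySem.Int.bitLength (m : Int) with hb
  rw [sos_unfold_pos m hm]
  by_cases hsmall : m / 1024 < 1024
  · -- one division suffices; b ≤ 20 and (b-1)/10 = 1
    have hb20 : b ≤ 20 := by
      by_contra h
      have : (2:Nat) ^ 20 ≤ 2 ^ (b - 1) := Nat.pow_le_pow_right (by norm_num) (by omega)
      norm_num at this
      omega
    have hL : (b - 1) / 10 = 1 := by omega
    rw [sosA, if_neg (by omega : ¬ (1024:Int) ≤ ((m / 1024 : Nat) : Int))]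
    rw [hL]
    simp only [Nat.shiftRight_eq_div_pow]
    norm_num
  · -- recurse: bitLength (m/1024) = b - 10
    have hm' : 1024 ≤ m / 1024 := by omega
    obtain ⟨hble', hblt', hb11'⟩ := pv_bl_bracket (m / 1024) hm'
    set b' := PySem.Int.bitLength ((m / 1024 : Nat) : Int) with hb'
    have hbm : b = b' + 10 := by
      have e1 : (2:Nat) ^ (b' + 9) = 1024 * 2 ^ (b' - 1) := by
        rw [show (1024:Nat) = 2 ^ 10 from rfl, ← pow_add]
        congr 1
        omega
      have e2 : (2:Nat) ^ (b' + 9 + 1) = 1024 * 2 ^ b' := by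
        rw [show (1024:Nat) = 2 ^ 10 from rfl, ← pow_add]
        congr 1
        omega
      have h1 : 1024 * 2 ^ (b' - 1) ≤ 1024 * (m / 1024) := Nat.mul_le_mul_left 1024 hble'
      have h2 : 1024 * (m / 1024 + 1) ≤ 1024 * 2 ^ b' := Nat.mul_le_mul_left 1024 hblt'
      have h3 := pv_bl_eq m (b' + 9) (by omega) (by omega)
      rw [← hb] at h3
      omega
    have hIH := IH (m / 1024) (by omega) hm' ((m % 1024 : Nat) : Int) (lvl + 1)
    rw [hIH]
    rw [← hb'] at *
    have hL' : 1 ≤ (b' - 1) / 10 := by omega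
    have hLm : (b - 1) / 10 = (b' - 1) / 10 + 1 := by omega
    rw [hLm]
    set L' := (b' - 1) / 10 with hLdef
    have hpow : ∀ k : Nat, 1024 * 2 ^ (10 * k) = 2 ^ (10 * (k + 1)) := by
      intro k
      rw [show (1024:Nat) = 2 ^ 10 by norm_num, ← pow_add]
      congr 1
      omega
    have sh1 : (m / 1024) >>> (10 * L') = m >>> (10 * (L' + 1)) := by
      rw [Nat.shiftRight_eq_div_pow, Nat.shiftRight_eq_div_pow, Nat.div_div_eq_div_mul, hpow L']
    have sh2 : (m / 1024) >>> (10 * (L' - 1)) = m >>> (10 * (L' + 1 - 1)) := by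
      rw [Nat.shiftRight_eq_div_pow, Nat.shiftRight_eq_div_pow, Nat.div_div_eq_div_mul, hpow (L' - 1),
        show L' - 1 + 1 = L' + 1 - 1 by omega]
    rw [sh1, sh2]
    simp only [Prod.mk.injEq, true_and]
    push_cast
    ring

theorem size2str_eq (s : Int) : size2strA s = size2strB s := by
  by_cases hs : s < 1024
  · simp only [size2strA, size2strB, if_pos hs]
    rw [sosA, if_neg (by omega)]
    norm_num
    decide
  · have hm : s = ((s.toNat : Nat) : Int) := by omega
    set m := s.toNat with hmdef
    rw [hm]
    have hm1024 : 1024 ≤ m := by omega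
    simp only [size2strA, size2strB, if_neg (show ¬ ((m:Int) < 1024) by omega)]
    rw [sos_eq m hm1024]
    have hcast : ∀ k : Nat, ((m : Int) >>> k) = ((m >>> k : Nat) : Int) := fun _ => rfl
    set L := (PySem.Int.bitLength (m : Int) - 1) / 10 with hL
    have hrem : PySem.Int.mod ((m : Int) >>> (10 * (L - 1))) 1024
        = ((m >>> (10 * (L - 1)) % 1024 : Nat) : Int) := by
      rw [hcast, PySem.Int.mod_eq_emod_of_pos (by omega : (0:Int) < 1024)]
      omega
    rw [hcast, hrem]
    dsimp only
    simp only [zero_add]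
    by_cases hL7 : L < 7
    · rw [if_pos hL7, if_neg (show ¬ ((L:Int) + 1 > 7) by omega)]
    · rw [if_neg hL7, if_pos (show ((L:Int) + 1 > 7) by omega)]

theorem lineAB (k : Nat) (e : String × Int × Int × Int × Int) :
    lineA ((k : Int) + 1) e = lineB k e := by
  simp [lineA, lineB, size2str_eq]

-- A's loop over enumerate(fg, 1) characterised by B's len/sum/join decomposition
theorem pv_fold_main (l : List (String × Int × Int × Int × Int)) :
    ∀ (k : Nat) (acc : List (List Char)) (t : Int),
    (PySem.List.enumerate l ((k : Int) + 1)).foldl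
      (fun (acc : List (List Char) × Int × Int) p =>
        (acc.1 ++ [lineA p.1 p.2], acc.2.1 + p.2.2.2.2.2, p.1))
      (acc, t, (k : Int)) =
      (acc ++ (l.zipIdx k).map (fun p => lineB p.2 p.1),
       t + (l.map (fun e => e.2.2.2.2)).sum, (k : Int) + l.length) := by
  induction l with
  | nil => simp [PySem.List.enumerate_nil]
  | cons x tl IH =>
    intro k acc t
    rw [PySem.List.enumerate_cons, List.zipIdx_cons]
    simp only [List.foldl_cons]
    have e1 : ((k : Int) + 1) = ((k + 1 : Nat) : Int) := by push_cast; ring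
    rw [e1, IH (k + 1) (acc ++ [lineA ((k + 1 : Nat) : Int) x]) (t + x.2.2.2.2)]
    rw [← e1, lineAB k x]
    simp only [List.map_cons, List.length_cons, List.sum_cons, Prod.mk.injEq]
    refine ⟨by simp, by ring, by push_cast; ring⟩

theorem gen_eq (fg : List (String × Int × Int × Int × Int)) :
    gen_pack_info fg = gen_pack_info_alt fg := by
  unfold gen_pack_info gen_pack_info_alt
  have h := pv_fold_main fg 0 [] 0
  norm_num at h
  rw [h]
  dsimp only
  simp [size2str_eq]

-- ===== VERDICT (by name: the statement is the Claim_ definition above) =====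
theorem gen_pack_info_spec : Claim_equal_gen_pack_info := by
  intro fg _
  unfold Spec_gen_pack_info
  exact gen_eq fg
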